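-- pv_equiv track=rewrite | github.com/IvanDemin3467/ulearn-me | ulearn-me/01-Search-and-sort/03-left-border-task.py | get_left_border_index_old
-- ===== SOURCE A (Python) =====
-- def get_left_border_index_old(phrases: [str], prefix: str, left: int, right: int) -> int:
--     """IReadOnlyList похож на List, но у него нет методов модификации списка.
--     Этот код решает задачу, но слишком неэффективно. Замените его на бинарный поиск!"""
--     prefix = prefix.casefold()
--     phrases_count = len(phrases)
--     for i in range(0, phrases_count):
--         current_phrase = phrases[i].casefold()
--         if (prefix == current_phrase) or current_phrase.startswith(prefix):
--             return i - 1
--     return phrases_count - 1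
-- ===== SOURCE B (Python) =====
-- def get_left_border_index_old(phrases, prefix, left, right):
--     # backward scan: keep the smallest matching index seen so far; no early exit,
--     # and the redundant equality test is folded into startswith.
--     p = prefix.casefold()
--     ans = len(phrases)
--     for i in reversed(range(len(phrases))):
--         if phrases[i].casefold().startswith(p):
--             ans = i
--     return ans - 1
-- ===== Notes on version B (the rewrite author's own statement) =====
-- stated objective: alternative
-- what changed: B scans the list back-to-front with an accumulator holding the smallest matching index (no early return), and drops A's redundant equality test since startswith subsumes it; the hinted binary search would be wrong on unsorted input, which A accepts.
import Mathlib
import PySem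

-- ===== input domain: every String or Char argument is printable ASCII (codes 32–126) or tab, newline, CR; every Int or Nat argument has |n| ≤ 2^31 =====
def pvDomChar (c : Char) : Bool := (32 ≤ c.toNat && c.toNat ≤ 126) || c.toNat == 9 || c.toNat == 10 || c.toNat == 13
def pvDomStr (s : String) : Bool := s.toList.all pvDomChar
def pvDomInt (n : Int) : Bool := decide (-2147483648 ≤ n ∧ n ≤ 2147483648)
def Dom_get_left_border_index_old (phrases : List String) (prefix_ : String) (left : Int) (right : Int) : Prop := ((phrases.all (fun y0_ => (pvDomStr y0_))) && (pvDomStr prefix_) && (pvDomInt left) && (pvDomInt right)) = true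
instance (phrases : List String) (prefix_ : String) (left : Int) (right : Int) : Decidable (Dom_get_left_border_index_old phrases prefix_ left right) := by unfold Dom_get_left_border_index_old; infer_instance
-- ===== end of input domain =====

-- B replaces A's forward early-return scan by a backward fold keeping the smallest
-- matching index (dropping the equality test subsumed by startswith): alternative, not faster.
-- str.casefold is ported as PySem.Str.lower — exact on the ASCII domain Dom states.

-- ===== PORT A =====
-- the for-loop over range(0, phrases_count) with early return, as structural recursion
-- (i is the running index; reaching the end means i = phrases_count, so i - 1 is returned)
def pvA_go (p : String) : List String → Int → Int
  | [], i => i - 1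
  | x :: xs, i =>
    let cur := PySem.Str.lower x
    if p == cur || PySem.Str.startswith cur p then i - 1 else pvA_go p xs (i + 1)

def get_left_border_index_old (phrases : List String) (prefix_ : String) (left : Int) (right : Int) : Int :=
  pvA_go (PySem.Str.lower prefix_) phrases 0

-- ===== PORT B =====
def get_left_border_index_old_alt (phrases : List String) (prefix_ : String) (left : Int) (right : Int) : Int :=
  let p := PySem.Str.lower prefix_
  let ans : Int :=
    ((List.range phrases.length).reverse).foldl
      (fun ans i =>
        if PySem.Str.startswith (PySem.Str.lower (phrases.getD i "")) p then (i : Int) else ans)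
      (phrases.length : Int)
  ans - 1

-- ===== PRECONDITION & SPEC =====
def Spec_get_left_border_index_old (phrases : List String) (prefix_ : String) (left : Int) (right : Int) (out : Int) : Prop := out = get_left_border_index_old_alt phrases prefix_ left right
instance (phrases : List String) (prefix_ : String) (left : Int) (right : Int) (out : Int) : Decidable (Spec_get_left_border_index_old phrases prefix_ left right out) := by unfold Spec_get_left_border_index_old; infer_instance

-- ===== CLAIM (what is proved, stated in full; the proofs are below) =====
def Claim_equal_get_left_border_index_old : Prop := ∀ (phrases : List String) (prefix_ : String) (left : Int) (right : Int), Dom_get_left_border_index_old phrases prefix_ left right → Spec_get_left_border_index_old phrases prefix_ left right (get_left_border_index_old phrases prefix_ left right)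

-- ===== LEMMAS AND PROOFS =====

-- index of the first phrase whose lowercasing starts with p (length if none)
def pvFirst (p : String) : List String → Nat
  | [] => 0
  | x :: xs => if PySem.Str.startswith (PySem.Str.lower x) p then 0 else pvFirst p xs + 1

theorem pv_sw_self (l : List Char) : PySem.Chars.startswith l l = true := by
  simp [PySem.Chars.startswith_iff]

theorem pvA_go_eq (p : String) (xs : List String) (i : Int) :
    pvA_go p xs i = i + (pvFirst p xs : Int) - 1 := by
  induction xs generalizing i with
  | nil => simp [pvA_go, pvFirst]
  | cons x xs ih =>
    by_cases h : PySem.Chars.startswith (PySem.Chars.lower x.toList) p.toList = true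
    · simp [pvA_go, pvFirst, h]
    · have hp : ¬ (p = PySem.Str.lower x) := by
        intro he
        apply h
        rw [he]
        simpa using pv_sw_self (PySem.Chars.lower x.toList)
      simp only [pvA_go, pvFirst]
      rw [if_neg (by simp [h, hp]), if_neg (by simp [h]), ih]
      push_cast
      ring

theorem pvB_fold (p : String) (xs : List String) (s : Nat) :
    (List.range xs.length).foldr
      (fun i ans =>
        if PySem.Str.startswith (PySem.Str.lower (xs.getD i "")) p then ((s + i : Nat) : Int) else ans)
      ((s + xs.length : Nat) : Int) = ((s + pvFirst p xs : Nat) : Int) := by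
  induction xs generalizing s with
  | nil => simp [pvFirst]
  | cons x xs ih =>
    rw [List.length_cons, List.range_succ_eq_map, List.foldr_cons, List.foldr_map]
    have hfun :
        (fun (i : Nat) (ans : Int) =>
          if PySem.Str.startswith (PySem.Str.lower ((x :: xs).getD i.succ "")) p then ((s + i.succ : Nat) : Int) else ans)
        = (fun i ans =>
          if PySem.Str.startswith (PySem.Str.lower (xs.getD i "")) p then ((s + 1 + i : Nat) : Int) else ans) := by
      funext i ans
      simp only [List.getD_cons_succ, Nat.succ_eq_add_one]
      have h2 : s + (i + 1) = s + 1 + i := by omega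
      rw [h2]
    have hinit : s + (xs.length + 1) = s + 1 + xs.length := by omega
    rw [hfun, hinit, ih (s + 1)]
    simp only [List.getD_cons_zero, pvFirst]
    by_cases h : PySem.Chars.startswith (PySem.Chars.lower x.toList) p.toList = true
    · simp [h]
    · rw [if_neg (by simp [h]), if_neg (by simp [h])]
      congr 1
      omega

-- ===== VERDICT (by name: the statement is the Claim_ definition above) =====
theorem get_left_border_index_old_spec : Claim_equal_get_left_border_index_old := by
  intro phrases prefix_ left right _
  unfold Spec_get_left_border_index_old get_left_border_index_old get_left_border_index_old_alt
  rw [pvA_go_eq]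
  simp only [List.foldl_reverse]
  have hb := pvB_fold (PySem.Str.lower prefix_) phrases 0
  simp only [Nat.zero_add] at hb
  rw [hb]
  omega
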